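-- pv_equiv track=rewrite | github.com/zhichul/llm_causal_reasoning | causal_graph/variable_elimination_with_heuristic.py | count_fill_in_fast
-- ===== SOURCE A (Python) =====
-- def count_fill_in_fast(graph: dict[int, set[int]], var: int):
--     neighbors = graph[var]
--
--     # Total potential edges in a clique of size k
--
--     k = len(neighbors)
--     total_possible = k * (k - 1) // 2
--
--     # Existing edges among neighbors
--     existing_edges = 0
--     for u in neighbors:
--         existing_edges += len(graph[u].intersection(neighbors))
--     existing_edges //= 2  # since counted twice
--
--     return total_possible - existing_edges
-- ===== SOURCE B (Python) =====
-- def count_fill_in_fast(graph, var):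
--     # Counter-based restructuring: aggregate all adjacency entries of the
--     # neighbors into one multiplicity table, then read off the counts at the
--     # neighbor keys; no per-pair membership test / intersection remains.
--     neighbors = graph[var]
--     k = len(neighbors)
--     cnt = {}
--     for u in neighbors:
--         for w in graph[u]:
--             cnt[w] = cnt.get(w, 0) + 1
--     existing = 0
--     for w in neighbors:
--         existing += cnt.get(w, 0)
--     return k * (k - 1) // 2 - existing // 2
-- ===== Notes on version B (the rewrite author's own statement) =====
-- stated objective: alternative
-- what changed: B builds one multiplicity counter of all adjacency entries of the neighbors and then sums the counter at each neighbor key, instead of intersecting each neighbor's adjacency set with the neighbor set; the per-neighbor intersection/membership scan disappears.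
import Mathlib
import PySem

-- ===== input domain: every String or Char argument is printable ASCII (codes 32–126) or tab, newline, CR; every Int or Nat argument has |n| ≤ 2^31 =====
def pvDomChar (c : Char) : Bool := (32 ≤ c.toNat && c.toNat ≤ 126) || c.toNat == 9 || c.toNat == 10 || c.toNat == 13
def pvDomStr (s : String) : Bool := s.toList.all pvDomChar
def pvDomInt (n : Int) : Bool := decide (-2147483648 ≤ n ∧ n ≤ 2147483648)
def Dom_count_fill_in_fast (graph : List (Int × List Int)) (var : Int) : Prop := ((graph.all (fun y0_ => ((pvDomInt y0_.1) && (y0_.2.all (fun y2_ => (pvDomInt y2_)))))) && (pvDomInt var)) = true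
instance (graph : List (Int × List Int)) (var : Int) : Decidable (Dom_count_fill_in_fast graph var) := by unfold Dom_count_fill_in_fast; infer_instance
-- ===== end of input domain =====

-- B replaces per-neighbor set intersections by one multiplicity counter of all
-- adjacency entries of the neighbors, summed at the neighbor keys (alternative decomposition).
-- ===== PORT A =====
def count_fill_in_fast (graph : List (Int × List Int)) (var : Int) : Int :=
  let neighbors : PySem.Set Int := (PySem.Dict.get? (PySem.Dict.mk graph) var).getD []  -- graph[var]; KeyError excluded by Pre_
  let k : Int := PySem.Set.len neighbors
  let total_possible : Int := PySem.Int.floordiv (k * (k - 1)) 2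
  let existing_edges : Int := neighbors.foldl
    (fun acc u => acc + PySem.Set.len (PySem.Set.inter ((PySem.Dict.get? (PySem.Dict.mk graph) u).getD []) neighbors)) 0
  total_possible - PySem.Int.floordiv existing_edges 2

-- ===== PORT B =====
def count_fill_in_fast_alt (graph : List (Int × List Int)) (var : Int) : Int :=
  let neighbors : PySem.Set Int := (PySem.Dict.get? (PySem.Dict.mk graph) var).getD []  -- graph[var]; KeyError excluded by Pre_
  let k : Int := neighbors.length
  let cnt : PySem.Dict Int Int := neighbors.foldl
    (fun d u => ((PySem.Dict.get? (PySem.Dict.mk graph) u).getD []).foldl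
      (fun d w => d.insert w (d.getD w 0 + 1)) d) PySem.Dict.empty
  let existing : Int := neighbors.foldl (fun acc w => acc + cnt.getD w 0) 0
  PySem.Int.floordiv (k * (k - 1)) 2 - PySem.Int.floordiv existing 2

-- ===== PRECONDITION & SPEC =====
-- Pre_: A raises KeyError unless var is a key of graph and every neighbor of var is a key of graph.
-- The Nodup conjunct only restates that graph[var] is a Python SET (its Lean encoding is a
-- duplicate-free list); no genuine Python input is excluded by it.
def Pre_count_fill_in_fast (graph : List (Int × List Int)) (var : Int) : Prop :=
  (PySem.Dict.get? (PySem.Dict.mk graph) var).isSome = true ∧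
  ((PySem.Dict.get? (PySem.Dict.mk graph) var).getD []).Nodup ∧
  ∀ u ∈ (PySem.Dict.get? (PySem.Dict.mk graph) var).getD [], (PySem.Dict.get? (PySem.Dict.mk graph) u).isSome = true
instance (graph : List (Int × List Int)) (var : Int) : Decidable (Pre_count_fill_in_fast graph var) := by unfold Pre_count_fill_in_fast; infer_instance
def pvWitness_count_fill_in_fast : (List (Int × List Int)) × Int :=
  ([(1, [2, 3]), (2, [1]), (3, [1])], 1)
def Spec_count_fill_in_fast (graph : List (Int × List Int)) (var : Int) (out : Int) : Prop := out = count_fill_in_fast_alt graph var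
instance (graph : List (Int × List Int)) (var : Int) (out : Int) : Decidable (Spec_count_fill_in_fast graph var out) := by unfold Spec_count_fill_in_fast; infer_instance

-- ===== CLAIM =====
def Claim_equal_count_fill_in_fast : Prop := ∀ (graph : List (Int × List Int)) (var : Int), Dom_count_fill_in_fast graph var → Pre_count_fill_in_fast graph var → Spec_count_fill_in_fast graph var (count_fill_in_fast graph var)

-- ===== LEMMAS AND PROOFS =====
-- The counter built by B's nested loop holds, at key v, the multiplicity of v
-- in the concatenation of the neighbors' adjacency lists.
theorem pvCounter (adjOf : Int → List Int) (nl : List Int) (d : PySem.Dict Int Int) (v : Int) :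
    (nl.foldl (fun d u => (adjOf u).foldl (fun d w => d.insert w (d.getD w 0 + 1)) d) d).getD v 0
      = d.getD v 0 + ((nl.flatMap adjOf).count v : Int) := by
  induction nl generalizing d with
  | nil => simp
  | cons x xs ih =>
    simp only [List.foldl, List.flatMap_cons, List.count_append, ih,
      PySem.Dict.getD_foldl_insert_add_one]
    push_cast; ring

theorem pvIndicator (x : Int) (nl : List Int) (h : nl.Nodup) :
    (nl.map (fun w => if x = w then (1 : Int) else 0)).sum
      = if nl.contains x then 1 else 0 := by
  induction nl with
  | nil => simp
  | cons y ys ih =>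
    simp only [List.map, List.sum_cons, ih h.of_cons, List.contains_cons]
    by_cases hxy : x = y
    · subst hxy
      obtain ⟨hy, -⟩ := List.nodup_cons.mp h
      simp [hy]
    · simp [hxy]

-- With a duplicate-free neighbor list, summing the flat multiplicities over the
-- neighbor keys equals the number of flat entries lying in the neighbor list.
theorem pvSumCount (nl flat : List Int) (h : nl.Nodup) :
    (nl.map (fun w => (flat.count w : Int))).sum
      = ((flat.filter (fun x => nl.contains x)).length : Int) := by
  induction flat with
  | nil => simp
  | cons x xs ih =>
    have hsplit : (nl.map (fun w => ((x :: xs).count w : Int))).sum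
        = (nl.map (fun w => (xs.count w : Int))).sum
          + (nl.map (fun w => if x = w then (1 : Int) else 0)).sum := by
      rw [← List.sum_map_add]
      congr 1
      refine List.map_congr_left ?_
      intro w _
      simp only [List.count_cons, beq_iff_eq]
      by_cases hxw : x = w <;> simp [hxw]
    rw [hsplit, ih, pvIndicator x nl h, List.filter_cons]
    by_cases hx : x ∈ nl <;> simp [hx]

-- ===== VERDICT =====
theorem count_fill_in_fast_spec : Claim_equal_count_fill_in_fast := by
  intro graph var _ hpre
  obtain ⟨-, hnd, -⟩ := hpre
  unfold Spec_count_fill_in_fast count_fill_in_fast count_fill_in_fast_alt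
  set nl := (PySem.Dict.get? (PySem.Dict.mk graph) var).getD [] with hnl
  have hA : nl.foldl
      (fun acc u => acc + PySem.Set.len (PySem.Set.inter ((PySem.Dict.get? (PySem.Dict.mk graph) u).getD []) nl)) 0
      = nl.foldl (fun acc w =>
          acc + (nl.foldl (fun d u => ((PySem.Dict.get? (PySem.Dict.mk graph) u).getD []).foldl
            (fun d w => d.insert w (d.getD w 0 + 1)) d) PySem.Dict.empty).getD w 0) 0 := by
    rw [PySem.List.foldl_add, PySem.List.foldl_add]
    congr 1
    have h1 : ∀ w : Int,
        (nl.foldl (fun d u => ((PySem.Dict.get? (PySem.Dict.mk graph) u).getD []).foldl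
          (fun d w => d.insert w (d.getD w 0 + 1)) d) PySem.Dict.empty).getD w 0
        = ((nl.flatMap (fun u => (PySem.Dict.get? (PySem.Dict.mk graph) u).getD [])).count w : Int) := by
      intro w
      rw [pvCounter]
      simp
    calc (nl.map (fun u => PySem.Set.len (PySem.Set.inter ((PySem.Dict.get? (PySem.Dict.mk graph) u).getD []) nl))).sum
        = ((nl.flatMap (fun u => (PySem.Dict.get? (PySem.Dict.mk graph) u).getD [])).filter
            (fun x => nl.contains x)).length := by
          simp only [PySem.Set.len, PySem.Set.inter, List.filter_flatMap]
          rw [List.length_flatMap]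
          push_cast
          simp [Function.comp_def]
      _ = (nl.map (fun w => ((nl.flatMap (fun u => (PySem.Dict.get? (PySem.Dict.mk graph) u).getD [])).count w : Int))).sum := by
          rw [pvSumCount _ _ hnd]
      _ = (nl.map (fun w =>
            (nl.foldl (fun d u => ((PySem.Dict.get? (PySem.Dict.mk graph) u).getD []).foldl
              (fun d w => d.insert w (d.getD w 0 + 1)) d) PySem.Dict.empty).getD w 0)).sum := by
          simp only [h1]
  simp only [PySem.Set.len] at hA ⊢
  rw [hA]
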